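-- pv_equiv track=rewrite | github.com/namya404/CSCI-544 | HW3/Shah-Namya-HW3.py | getmaxpaths
-- ===== SOURCE A (Python) =====
-- def getmaxpaths(paths):
--     result = {}
--     for key, value in paths.items():
--         last_element = key.split('|')[-1]
--         if last_element not in result or value > result[last_element][1]:
--             result[last_element] = (key, value)
--
--     # Construct the final dictionary from the collected key-value pairs
--     final_dict = {key_value[0]: key_value[1] for key_value in result.values()}
--     return final_dict
-- ===== SOURCE B (Python) =====
-- def getmaxpaths(paths):
--     # group entries by trailing segment, then reduce each group with max (first maximal wins)
--     groups = {}
--     for key, value in paths.items():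
--         groups.setdefault(key.split('|')[-1], []).append((key, value))
--     return dict(max(g, key=lambda kv: kv[1]) for g in groups.values())
-- ===== Notes on version B (the rewrite author's own statement) =====
-- stated objective: alternative
-- what changed: Replaces A's fused incremental max-tracking dict with an explicit group-by-trailing-segment pass followed by a per-group max reduction (max with key returns the first maximal entry, matching A's strict-> keep-first tie rule).
import Mathlib
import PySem

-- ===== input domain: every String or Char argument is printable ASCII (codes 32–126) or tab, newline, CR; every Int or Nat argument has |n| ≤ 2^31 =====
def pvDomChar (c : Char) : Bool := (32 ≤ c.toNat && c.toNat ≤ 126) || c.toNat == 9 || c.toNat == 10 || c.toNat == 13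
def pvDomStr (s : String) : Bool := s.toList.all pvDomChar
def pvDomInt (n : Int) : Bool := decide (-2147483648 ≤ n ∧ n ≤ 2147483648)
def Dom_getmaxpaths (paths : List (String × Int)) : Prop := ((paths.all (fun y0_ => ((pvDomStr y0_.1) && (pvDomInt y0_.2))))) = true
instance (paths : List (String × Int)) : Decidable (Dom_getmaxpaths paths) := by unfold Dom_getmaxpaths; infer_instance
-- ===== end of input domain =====

-- B replaces A's fused incremental max-tracking with group-by-trailing-segment then per-group max reduction (alternative decomposition, same cost).


-- ===== PORT A =====
-- key.split('|')[-1]  (shared helper; split with a non-empty separator never raises, [-1] of its non-empty result)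
def pvLastSeg (key : String) : String :=
  PySem.List.pyGetD ((PySem.Str.split? key "|").getD []) (-1) ""

def getmaxpaths (paths : List (String × Int)) : List (String × Int) :=
  let result : PySem.Dict String (String × Int) :=
    paths.foldl (fun r kv =>
      let le := pvLastSeg kv.1
      match r.get? le with
      | none => r.insert le kv
      | some cur => if kv.2 > cur.2 then r.insert le kv else r) ⟨[]⟩
  (result.values.foldl (fun (d : PySem.Dict String Int) kv => d.insert kv.1 kv.2) ⟨[]⟩).items

-- ===== PORT B =====
def getmaxpaths_alt (paths : List (String × Int)) : List (String × Int) :=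
  let groups : PySem.Dict String (List (String × Int)) :=
    paths.foldl (fun g kv => g.modify (pvLastSeg kv.1) [] (fun l => l ++ [kv])) ⟨[]⟩
  let winners := groups.values.map (fun l => PySem.List.maxD l (fun kv => kv.2) ("", 0))
  (winners.foldl (fun (d : PySem.Dict String Int) kv => d.insert kv.1 kv.2) ⟨[]⟩).items

-- ===== PRECONDITION & SPEC =====
def Spec_getmaxpaths (paths : List (String × Int)) (out : List (String × Int)) : Prop := out = getmaxpaths_alt paths
instance (paths : List (String × Int)) (out : List (String × Int)) : Decidable (Spec_getmaxpaths paths out) := by unfold Spec_getmaxpaths; infer_instance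

-- ===== CLAIM (what is proved, stated in full; the proofs are below) =====
def Claim_equal_getmaxpaths : Prop := ∀ (paths : List (String × Int)), Dom_getmaxpaths paths → Spec_getmaxpaths paths (getmaxpaths paths)

-- ===== LEMMAS AND PROOFS =====

-- the per-group winner B computes
def pvMax (l : List (String × Int)) : String × Int :=
  PySem.List.maxD l (fun kv => kv.2) ("", 0)

def pvEnt (p : String × List (String × Int)) : String × (String × Int) :=
  (p.1, pvMax p.2)

-- A's loop step / B's loop step
def pvStepA (r : PySem.Dict String (String × Int)) (kv : String × Int) : PySem.Dict String (String × Int) :=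
  let le := pvLastSeg kv.1
  match r.get? le with
  | none => r.insert le kv
  | some cur => if kv.2 > cur.2 then r.insert le kv else r

def pvStepB (g : PySem.Dict String (List (String × Int))) (kv : String × Int) : PySem.Dict String (List (String × Int)) :=
  g.modify (pvLastSeg kv.1) [] (fun l => l ++ [kv])

lemma pvMax_singleton (kv : String × Int) : pvMax [kv] = kv := by
  simp [pvMax, PySem.List.maxD, PySem.List.max?]

lemma pvMax_append (l : List (String × Int)) (kv : String × Int) (h : l ≠ []) :
    pvMax (l ++ [kv]) = if (pvMax l).2 < kv.2 then kv else pvMax l := by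
  obtain ⟨m, hm⟩ := Option.ne_none_iff_exists'.mp
    (fun hn => h ((PySem.List.max?_eq_none_iff l (fun kv => kv.2)).mp hn))
  have hstep : PySem.List.max? (l ++ [kv]) (fun kv => kv.2)
      = if m.2 < kv.2 then some kv else some m := by
    simp only [PySem.List.max?, List.foldl_append, List.foldl_cons, List.foldl_nil]
    simp only [PySem.List.max?] at hm
    rw [hm]
  simp only [pvMax, PySem.List.maxD, hstep, hm, Option.getD_some]
  by_cases hlt : m.2 < kv.2
  · rw [if_pos hlt, if_pos hlt, Option.getD_some]
  · rw [if_neg hlt, if_neg hlt, Option.getD_some]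

-- with nodup keys, any entry whose key matches find?'s result is that result
lemma pvFind_unique {ν : Type} (gl : List (String × ν)) (le : String) (p0 : String × ν)
    (hnd : (gl.map Prod.fst).Nodup)
    (hf : gl.find? (fun p => p.1 == le) = some p0) :
    ∀ q ∈ gl, q.1 = le → q = p0 := by
  induction gl with
  | nil => simp at hf
  | cons a t ih =>
    intro q hq hqle
    simp only [List.map_cons, List.nodup_cons] at hnd
    by_cases ha : a.1 = le
    · rw [List.find?_cons_of_pos (by simp [ha])] at hf
      obtain rfl : a = p0 := by injection hf
      rcases List.mem_cons.mp hq with hq | hq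
      · exact hq
      · exfalso
        have : a.1 ∈ t.map Prod.fst := by
          rw [ha, ← hqle]; exact List.mem_map_of_mem hq
        exact hnd.1 this
    · rw [List.find?_cons_of_neg (by simp [ha])] at hf
      rcases List.mem_cons.mp hq with hq | hq
      · exact absurd (hq ▸ hqle) ha
      · exact ih hnd.2 hf q hq hqle

-- invariant on B's group dict
def pvInv (gl : List (String × List (String × Int))) : Prop :=
  (∀ p ∈ gl, p.2 ≠ []) ∧ (gl.map Prod.fst).Nodup

lemma pvInv_step (gl : List (String × List (String × Int))) (kv : String × Int)
    (h : pvInv gl) : pvInv (pvStepB ⟨gl⟩ kv).items := by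
  obtain ⟨hne, hnd⟩ := h
  simp only [pvStepB, PySem.Dict.modify, PySem.Dict.insert, PySem.Dict.contains, PySem.Dict.getD,
    PySem.Dict.get?]
  split
  · next hc =>
    constructor
    · intro p hp
      obtain ⟨q, hq, hqe⟩ := List.mem_map.mp hp
      subst hqe
      by_cases hm : (q.1 == pvLastSeg kv.1) = true
      · rw [if_pos hm]; simp
      · rw [if_neg hm]; exact hne q hq
    · have hk : (List.map (fun p =>
          if (p.1 == pvLastSeg kv.1) = true
          then (pvLastSeg kv.1,
            (Option.map Prod.snd (List.find? (fun p => p.1 == pvLastSeg kv.1) gl)).getD [] ++ [kv])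
          else p) gl).map Prod.fst = gl.map Prod.fst := by
        rw [List.map_map]
        refine List.map_congr_left ?_
        intro q _
        by_cases hm : (q.1 == pvLastSeg kv.1) = true
        · simp only [Function.comp_apply, if_pos hm]; exact (eq_of_beq hm).symm
        · simp only [Function.comp_apply, if_neg hm]
      rw [hk]; exact hnd
  · next hc =>
    have hcf : ∀ x ∈ gl, ¬ (x.1 == pvLastSeg kv.1) = true := by
      intro x hx hxt
      exact hc (List.any_eq_true.mpr ⟨x, hx, hxt⟩)
    have hfind : List.find? (fun p => p.1 == pvLastSeg kv.1) gl = none :=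
      List.find?_eq_none.mpr hcf
    constructor
    · intro p hp
      rcases List.mem_append.mp hp with hp | hp
      · exact hne p hp
      · simp only [List.mem_singleton] at hp
        subst hp
        simp [hfind]
    · simp only [List.map_append, List.map_cons, List.map_nil]
      refine List.nodup_append.mpr ⟨hnd, List.nodup_singleton _, ?_⟩
      intro x hx b hb
      simp only [List.mem_singleton] at hb
      subst hb
      obtain ⟨q, hq, hqe⟩ := List.mem_map.mp hx
      intro hxe
      exact hcf q hq (by simp [hqe, hxe])

-- one step of A on the projected dict equals the projection of one step of B
lemma pvStep_eq (gl : List (String × List (String × Int))) (kv : String × Int)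
    (h : pvInv gl) :
    pvStepA ⟨gl.map pvEnt⟩ kv = ⟨(pvStepB ⟨gl⟩ kv).items.map pvEnt⟩ := by
  obtain ⟨hne, hnd⟩ := h
  have hfindmap : List.find? (fun p => p.1 == pvLastSeg kv.1) (gl.map pvEnt)
      = (List.find? (fun p => p.1 == pvLastSeg kv.1) gl).map pvEnt := by
    rw [List.find?_map]; rfl
  have hanymap : (gl.map pvEnt).any (fun p => p.1 == pvLastSeg kv.1)
      = gl.any (fun p => p.1 == pvLastSeg kv.1) := by
    rw [List.any_map]; rfl
  rcases hf : List.find? (fun p => p.1 == pvLastSeg kv.1) gl with _ | p0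
  · -- group absent: both append a fresh singleton group / its winner
    have hc : gl.any (fun p => p.1 == pvLastSeg kv.1) = false :=
      List.any_eq_false.mpr (List.find?_eq_none.mp hf)
    simp only [pvStepA, pvStepB, PySem.Dict.get?, PySem.Dict.modify, PySem.Dict.getD,
      PySem.Dict.insert, PySem.Dict.contains, hfindmap, hf, hanymap, hc, Option.map_none,
      Bool.false_eq_true, if_false]
    simp [pvEnt, pvMax_singleton]
  · -- group present
    have hp0 : p0 ∈ gl := List.mem_of_find?_eq_some hf
    have hp0le : p0.1 = pvLastSeg kv.1 := eq_of_beq (by simpa using List.find?_some hf)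
    have hc : gl.any (fun p => p.1 == pvLastSeg kv.1) = true :=
      List.any_eq_true.mpr ⟨p0, hp0, by simp [hp0le]⟩
    have hp0ne : p0.2 ≠ [] := hne p0 hp0
    simp only [pvStepA, pvStepB, PySem.Dict.get?, PySem.Dict.modify, PySem.Dict.getD,
      PySem.Dict.insert, PySem.Dict.contains, hfindmap, hf, hanymap, hc, Option.map_some,
      Option.getD_some, if_pos]
    by_cases hgt : kv.2 > (pvEnt p0).2.2
    · -- new entry wins in both
      rw [if_pos hgt]
      congr 1
      rw [List.map_map, List.map_map]
      refine List.map_congr_left ?_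
      intro q _
      by_cases hm : (q.1 == pvLastSeg kv.1) = true
      · have hm' : ((pvEnt q).1 == pvLastSeg kv.1) = true := hm
        simp only [Function.comp_apply, if_pos hm, if_pos hm']
        show (pvLastSeg kv.1, kv) = pvEnt (pvLastSeg kv.1, p0.2 ++ [kv])
        simp only [pvEnt, pvMax_append p0.2 kv hp0ne]
        rw [if_pos (show (pvMax p0.2).2 < kv.2 from hgt)]
      · have hm' : ¬ ((pvEnt q).1 == pvLastSeg kv.1) = true := hm
        simp only [Function.comp_apply, if_neg hm, if_neg hm']
    · -- old entry stays the winner in both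
      rw [if_neg hgt]
      congr 1
      rw [List.map_map]
      refine List.map_congr_left ?_
      intro q hq
      by_cases hm : (q.1 == pvLastSeg kv.1) = true
      · have hqp0 : q = p0 := pvFind_unique gl (pvLastSeg kv.1) p0 hnd hf q hq (eq_of_beq hm)
        simp only [Function.comp_apply, if_pos hm]
        rw [hqp0]
        show pvEnt p0 = pvEnt (pvLastSeg kv.1, p0.2 ++ [kv])
        simp only [pvEnt, pvMax_append p0.2 kv hp0ne]
        rw [if_neg (show ¬ (pvMax p0.2).2 < kv.2 from hgt), hp0le]
      · simp only [Function.comp_apply, if_neg hm]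

-- the whole loops stay linked
lemma pvLoop_eq (paths : List (String × Int)) :
    ∀ gl, pvInv gl →
      (paths.foldl pvStepA ⟨gl.map pvEnt⟩).items
        = ((paths.foldl pvStepB ⟨gl⟩).items).map pvEnt := by
  induction paths with
  | nil => intro gl _; rfl
  | cons kv t ih =>
    intro gl hinv
    simp only [List.foldl_cons]
    rw [pvStep_eq gl kv hinv]
    have := ih (pvStepB ⟨gl⟩ kv).items (pvInv_step gl kv hinv)
    simpa using this

-- ===== VERDICT (by name: the statement is the Claim_ definition above) =====
theorem getmaxpaths_spec : Claim_equal_getmaxpaths := by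
  intro paths _
  unfold Spec_getmaxpaths getmaxpaths getmaxpaths_alt
  have h := pvLoop_eq paths [] ⟨by simp, by simp⟩
  simp only [List.map_nil] at h
  have hfold : (List.foldl (fun r kv =>
      let le := pvLastSeg kv.1
      match r.get? le with
      | none => r.insert le kv
      | some cur => if kv.2 > cur.2 then r.insert le kv else r)
      (⟨[]⟩ : PySem.Dict String (String × Int)) paths)
      = List.foldl pvStepA ⟨[]⟩ paths := rfl
  have hfoldB : (List.foldl (fun g kv => g.modify (pvLastSeg kv.1) [] (fun l => l ++ [kv]))
      (⟨[]⟩ : PySem.Dict String (List (String × Int))) paths)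
      = List.foldl pvStepB ⟨[]⟩ paths := rfl
  simp only [hfold, hfoldB]
  have hvals : (List.foldl pvStepA ⟨[]⟩ paths).values
      = (List.foldl pvStepB ⟨[]⟩ paths).values.map pvMax := by
    simp only [PySem.Dict.values, h, List.map_map]
    rfl
  rw [hvals]
  rfl
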